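/-
  NON-VACUITY AND INTERFACE CHECKS for the first half of start_decoder (Vorbis/Spec/StartDecoderA.lean): nothing here is used by a
  statement; every `example` / lemma shows that an assertion of the family can be ESTABLISHED from what its predecessor and the
  code in between provide, or that a callee's precondition (the Spec its OWNER defines: S1 Vorbis/Spec/Alloc.lean, S2
  Vorbis/Spec/Reader.lean, S3 Vorbis/Spec/Codebook.lean) follows from an assertion at the call site.

      1. the chain of bodies: each `Body<next>` from `Body<prev>` + the facts the segment itself establishes (same state: the machine
         part — the new `Frame` at the new pc, the registers and slots — is taken as hypotheses)
      2. call sites: `ReaderEnv` (every reader: start_page, getn, get8, get32, start_packet, next_segment, get8_packet, get32_packet,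
         skip, get_bits), `ArenaPre` (setup_malloc, setup_temp_malloc, setup_temp_free), `AccelPre` (compute_accelerated_huffman)
         from the assertion at the cut point before the call
-/
import Vorbis.Spec.StartDecoderA
import Vorbis.Spec.Reader
import Vorbis.Spec.Alloc
import Vorbis.Spec.Codebook
namespace Vorbis.Spec.StartDecoder
open X86 X86.User Asan

variable {u₀ : State} {g : Ghost} {A : Arena × List Obj} {v : State}

/-! ### 1. The chain of bodies -/

/-- `.2`'s exit: what survives of P3 (in the exit memory), the three stores / spills of the segment ⇒ `Body3`. -/
example (fr : Frame u₀ g pc_3 A v) (hh : g.Hand A) (hrbp : v.reg .rbp = addr g.f)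
    (henv : Env (g.Blk A) (g.Live A) v.mem) (harena : ArenaOK A.1 A.2 v.mem g.f) (hno : A.1.temps = [])
    (hbits : Bits (g.Blk A) g.len v.mem g.f) (hc : SDFrameConsts 0 v.mem g.R)
    (hfirst : stb_vorbis.first_decode v.mem g.f = 1) (hd : stb_vorbis.discard_samples_deferred v.mem g.f = 0)
    (hz : ZeroRange v.mem g.f Off.stb_vorbis.vendor Off.stb_vorbis.stream)
    (hr : RestZero v.mem g.f Off.stb_vorbis.codebook_count)
    (hn : stb_vorbis.next_seg v.mem g.f = 0) : Body3 u₀ g A v :=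
  { frame := fr
    hand := hh
    rbp := hrbp
    sd := sd0_of_parts henv harena hno hbits hc (up g A) hfirst hd hz hr
    next_seg := hn }

/-- … and at `At2` itself P3 provides the two zero ranges, the fresh arena, `discard_samples_deferred = 0` and `next_seg = 0`. -/
example (h : Body2 u₀ g A v) :
    ZeroRange v.mem g.f Off.stb_vorbis.vendor Off.stb_vorbis.stream ∧ RestZero v.mem g.f Off.stb_vorbis.codebook_count ∧
      A.1.temps = [] ∧ stb_vorbis.discard_samples_deferred v.mem g.f = 0 ∧ stb_vorbis.next_seg v.mem g.f = 0 := by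
  have hz2 := h.p3.h0.z2
  simp only [voff] at hz2
  refine ⟨(p3_zero h.p3).1, (p3_zero h.p3).2, h.p3.fresh.2, ?_, ?_⟩
  · simp only [vacc, voff]
    exact hz2.i32 1784 (by omega) (by omega)
  · simp only [vacc, voff]
    exact hz2.i32 1752 (by omega) (by omega)

/-- `.3`'s exit: HD1 – HD3 ⇒ `Body4`. -/
example (h : Body3 u₀ g A v) (fr : Frame u₀ g pc_4 A v) (hh : HeaderOK v.mem g.f) : Body4 u₀ g A v :=
  { frame := fr
    hand := h.hand
    rbp := h.rbp
    sd := sd1_of_sd0 h.sd hh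
    next_seg := h.next_seg }

/-- `.4`'s exit: `i = 0` ⇒ `Body5`. -/
example (h : Body4 u₀ g A v) (fr : Frame u₀ g pc_5 A v) (hr : v.reg .r13 = addr 0) : Body5 u₀ g A 0 v :=
  { frame := fr
    hand := h.hand
    rbp := h.rbp
    sd := h.sd
    r13 := hr
    i_le := by omega }

/-- `.5`'s exit: the vendor block of `len + 1` bytes (a block of the arena after `setup_malloc`), `vendor` stored ⇒ `Body6`. The
zero fields `comment_list_length`, `comment_list` come from `SD 1`'s `commentZero` (the store went to `[f+24, f+32)` only). -/
example (h : Body5 u₀ g A 6 v) (fr : Frame u₀ g pc_6 A v) (len : Nat) (hlen : len ≤ 0x7ffffffe)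
    (h12 : v.reg .r12 = addr 0) (h13 : v.reg .r13 = addr len) (hv : A.1.Blk ⟨stb_vorbis.vendor v.mem g.f, len + 1⟩)
    (hl : stb_vorbis.comment_list_length v.mem g.f = 0) (hc : stb_vorbis.comment_list v.mem g.f = 0) :
    Body6 u₀ g A 0 len v :=
  { frame := fr
    hand := h.hand
    rbp := h.rbp
    sd := SDw.of_sd h.sd
    noTemps := h.sd.noTemps
    r12 := h12
    r13 := h13
    i_le := by omega
    len_le := hlen
    vendor := hv
    length0 := hl
    list0 := hc }

/-- `.6`'s exit on the path `n ≤ 0`: CM1 from the vendor block, CM2's first disjunct, CM3 vacuous ⇒ `Body7` with `i = 0`. -/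
example (len : Nat) (h : Body6 u₀ g A len len v) (fr : Frame u₀ g pc_7 A v)
    (hn : stb_vorbis.comment_list_length v.mem g.f ≤ 0) (hs : v.mem.u32 (g.R + 0x18) = 0) : Body7 u₀ g A 0 v :=
  { frame := fr
    hand := h.hand
    rbp := h.rbp
    sd := h.sd
    noTemps := h.noTemps
    slot_i := hs
    i_le := by omega
    comment :=
      { CM1 := Or.inr ⟨len, by have := h.len_le; omega, h.vendor⟩
        CM2 := Or.inl hn
        CM3 := ⟨fun i hi => absurd hi (Nat.not_lt_zero i), fun i _ hi => by omega⟩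
        le := Or.inr rfl } }

/-- `.7`'s exit (`n ≤ i`): the counter has reached the count (or the count is not positive) ⇒ `Body8`. -/
example (i : Nat) (h : Body7 u₀ g A i v) (fr : Frame u₀ g pc_8 A v)
    (hexit : stb_vorbis.comment_list_length v.mem g.f ≤ (i : Int)) : Body8 u₀ g A v := by
  refine ⟨fr, h.hand, h.rbp, h.sd, h.noTemps, ?_⟩
  rw [CommentsOK_def]
  have e : (stb_vorbis.comment_list_length v.mem g.f).toNat = i := by
    rcases h.comment.le with hle | h0
    · omega
    · omega
  rw [e]
  exact h.comment

/-- `.8`'s exit: the do-while left 0 in dword [R+24H] ⇒ `Body9` (`SD 2` and its record over the arena's blocks). -/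
example (h : Body8 u₀ g A v) (fr : Frame u₀ g pc_9 A v) (hz : v.mem.u32 (g.R + 0x24) = 0)
    (hb : stb_vorbis.bytes_in_seg v.mem g.f = 0) : Body9 u₀ g A v :=
  { frame := fr
    hand := h.hand
    rbp := h.rbp
    sd := sd2_of_sdw1 h.sd h.noTemps (CommentsOK.reblk h.comment (fun B _ hB => up g A B hB)) hz
    own :=
      { comment := fun _ => h.comment
        cb0 := fun h3 => absurd h3 (by omega)
        nonnull := fun h3 => absurd h3 (by omega)
        books := fun h5 => absurd h5 (by omega)
        floor := fun h6 => absurd h6 (by omega)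
        residue := fun h7 => absurd h7 (by omega)
        mapping := fun h8 => absurd h8 (by omega) }
    bytes0 := hb }

/-- `.9`'s exit: what survives of `SD 2` (in the exit memory), `codebook_count` and the zero-filled codebooks block ⇒ `BodyC1`
(`SD4 0`, and the record WITH THE AGES: CM1 – CM3 over the blocks of the snapshot `A2` = the arena at `At9`, the codebooks block
allocated since). -/
example (fr : Frame u₀ g pc_C1 A v) (hh : g.Hand A) (hrbp : v.reg .rbp = addr g.f)
    (henv : Env (g.Blk A) (g.Live A) v.mem) (hc : SDFrameConsts 2 v.mem g.R) (harena : ArenaOK A.1 A.2 v.mem g.f)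
    (hno : A.1.temps = []) (hbits : Bits (g.Blk A) g.len v.mem g.f) (hfirst : stb_vorbis.first_decode v.mem g.f = 1)
    (hd : stb_vorbis.discard_samples_deferred v.mem g.f = 0) (hhd : HeaderOK v.mem g.f)
    (A2 : Arena) (hext : A2.Extends A.1) (hcm : CommentsOK A2.Blk v.mem g.f)
    (hF1 : 1 ≤ stb_vorbis.codebook_count v.mem g.f ∧ stb_vorbis.codebook_count v.mem g.f ≤ 256)
    (hF2 : Since A2 A.1
      ⟨stb_vorbis.codebooks v.mem g.f, Off.sizeof.Codebook * (stb_vorbis.codebook_count v.mem g.f).toNat⟩)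
    (hne : stb_vorbis.codebooks v.mem g.f ≠ 0)
    (hz : ZF v.mem (stb_vorbis.codebooks v.mem g.f) (stb_vorbis.codebook_count v.mem g.f).toNat 0)
    (hr : RestZero v.mem g.f Off.stb_vorbis.floor_count) : BodyC1 u₀ g A v := by
  have hages : BookTrans A2 A.1 A.1 A.1 v.mem g.f 0 := BookTrans.zero hext hcm hF1 hF2 hne
  have hown := hages.upTo.own
  exact
    { frame := fr
      hand := hh
      rbp := hrbp
      sd := sd4_of_parts henv hc harena (up g A) hno hbits hfirst hd hhd
        (CommentsOK.reblk (hown.comment (by omega)) (fun B _ hB => up g A B hB))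
        (CB0.reblk (hown.cb0 (by omega)) (fun B _ hB => up g A B hB)) hne (by omega) hz hr
      ages := ⟨A2, hages⟩ }

/-- … and the two age clauses come from `At9` and the allocator's post: `Body9.own` IS CM1 – CM3 over the blocks of the arena of
`At9` (the snapshot `A2`: segment `.9` allocates nothing before the call at 0x114240), and the block `setup_malloc` returns was
allocated since (`ArenaOK.since_pushSetup`, with the ArenaOK of BEFORE the call). -/
example (h : Body9 u₀ g A v) {mem : Mem} (harena : ArenaOK A.1 A.2 mem g.f) (n : Nat) :
    CommentsOK A.1.Blk v.mem g.f ∧ A.1.Extends (A.1.pushSetup n) ∧ Since A.1 (A.1.pushSetup n) ⟨A.1.B + (A.1.S + 32), n⟩ :=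
  ⟨h.own.comment (by omega), A.1.extends_pushSetup n, harena.since_pushSetup n⟩

/-- `C1`'s exit: the two spills ⇒ `BodyC2 0` (the snapshot `A3` is the arena of this point: `C1` allocates nothing). -/
example (h : BodyC1 u₀ g A v) (fr : Frame u₀ g pc_C2 A v) (hf : v.mem.u64 (g.R + 0x18) = g.f)
    (hi : v.mem.u32 (g.R + 0x30) = 0) : BodyC2 u₀ g 0 A v := by
  obtain ⟨A2, ha⟩ := h.ages
  exact
    { frame := fr
      hand := h.hand
      slot_f := hf
      slot_i := hi
      sd := h.sd
      ages := ⟨A2, A.1, ha⟩ }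

/-- `C2`'s head: `i < count` and `r14 = cb(i)` ⇒ CUR(i), with the arena of this point as the head-of-iteration snapshot. -/
example (i : Nat) (h : BodyC2 u₀ g i A v) (hlt : (i : Int) < stb_vorbis.codebook_count v.mem g.f)
    (hr : v.reg .r14 = addr (g.cb v.mem i)) : ∃ A2 A3, Cur g i A2 A3 A.1 A v := by
  obtain ⟨A2, A3, ha⟩ := h.ages
  exact ⟨A2, A3, Cur.of_sd4 h.sd ha h.hand hlt h.slot_f h.slot_i hr⟩

/-- `C2`'s exit on the dense path: `setup_malloc(f, entries)` returned the `lengths` block; the ghost arena grew to `A.1.pushSetup n`;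
the block was allocated SINCE the head of the iteration — the clause `InC3.lengths` / `LengthsAt.dense_block`. -/
example (i : Nat) (A2 A3 : Arena) (h : Cur g i A2 A3 A.1 A v) (n : Nat) :
    Since A.1 (A.1.pushSetup n) ⟨A.1.B + (A.1.S + 32), n⟩ ∧ BookTrans A2 A3 A.1 (A.1.pushSetup n) v.mem g.f i :=
  ⟨h.sd.arena.since_pushSetup n, h.ages.grow (A.1.extends_pushSetup n)⟩

/-- `C2`'s exit at `count ≤ i` ⇒ `BodyC16`. -/
example (i : Nat) (h : BodyC2 u₀ g i A v) (fr : Frame u₀ g pc_C16 A v)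
    (hge : stb_vorbis.codebook_count v.mem g.f ≤ (i : Int)) : BodyC16 u₀ g i A v := by
  refine ⟨fr, h.hand, h.slot_f, ?_, h.sd, h.ages⟩
  have := h.sd.done.upto
  omega

/-- `C6`'s exit, a dense book: the snapshot `Aw` is the arena of `AtC6`; `lengths` (allocated since `Ai`) is a block of it, the
`codewords` block `setup_malloc` returns was allocated since — `Built.dense_lengths`, `Built.dense_codewords`. -/
example (i : Nat) (A2 A3 Ai : Arena) (lengths count : Nat) (h : InC6 u₀ g i A2 A3 Ai A lengths count v)
    (hs : Codebook.sparse v.mem (g.cb v.mem i) = 0) (n : Nat) :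
    Since Ai A.1 ⟨lengths, (Codebook.entries v.mem (g.cb v.mem i)).toNat⟩ ∧
      Since A.1 (A.1.pushSetup n) ⟨A.1.B + (A.1.S + 32), n⟩ ∧ Ai.Extends A.1 ∧ A.1.Extends (A.1.pushSetup n) :=
  ⟨h.place.dense_block hs, h.cur.sd.arena.since_pushSetup n, h.cur.ages.exti, A.1.extends_pushSetup n⟩

/-- `C8`'s exit: K3 over the blocks allocated since the head of the iteration from `Built` (`lengths` older than `Aw`, `codewords`
younger; a sparse book: its final `codeword_lengths` block, `codewords = NULL` after the frees). -/
example (i : Nat) (A2 A3 Ai Aw : Arena) (lengths values : Nat) (h : Built g i A2 A3 Ai Aw A lengths values v)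
    (hnull : Codebook.sparse v.mem (g.cb v.mem i) = 1 → Codebook.codewords v.mem (g.cb v.mem i) = 0) :
    Codebook.K3 (Since Ai A.1) v.mem (g.cb v.mem i) :=
  ⟨fun hs => h.dense_k3 hs, fun hs => ⟨h.sparse_k3 hs, hnull hs⟩⟩

/-- `C9`'s exit at `lookup_type = 0` ⇒ `BodyC10 i` (K6: type 0, `multiplicands = NULL` from the zero fill); the current arena becomes
the head-of-iteration snapshot of `i + 1`. -/
example (i : Nat) (A2 A3 Ai : Arena) (h : InC9 u₀ g i A2 A3 Ai A v) (k5 : Codebook.K5 v.mem (g.cb v.mem i))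
    (fr : Frame u₀ g pc_C10 A v) : BodyC10 u₀ g i A v := by
  have h6 : Codebook.K6 (Since Ai A.1) v.mem (g.cb v.mem i) :=
    { type_02 := Or.inl h.fresh.lookup_type
      prod_le := fun h2 => by
        have := h.fresh.lookup_type
        omega
      mults := fun h2 => by
        have := h.fresh.lookup_type
        omega
      null := fun _ => h.fresh.multiplicands }
  have hok : CodebookOK (Since Ai A.1) v.mem (g.cb v.mem i) := ⟨h.k1, h.k2, h.k3, h.k4, h.k4c, k5, h6⟩
  obtain ⟨hsd, hages⟩ := h.cur.toSD4 h.noTemps hok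
  exact ⟨fr, h.cur.hand, h.cur.slot_f, h.cur.slot_i, hsd, A2, A3, hages⟩

/-- `C12`'s exit, a type-1 book: the snapshot `Am` is the arena of `AtC12`; K1 – K5 (over the blocks allocated since `Ai`) are over
blocks OF it, the `multiplicands` block `setup_malloc` returns was allocated since — `InC13.k`, `InC13.mu`. -/
example (i : Nat) (A2 A3 Ai : Arena) (mults : Nat) (h : InC12 u₀ g i A2 A3 Ai A mults v) (n : Nat) :
    K15 (Since Ai A.1) v.mem (g.cb v.mem i) ∧ Since A.1 (A.1.pushSetup n) ⟨A.1.B + (A.1.S + 32), n⟩ ∧ Ai.Extends A.1 :=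
  ⟨h.k, h.cur.sd.arena.since_pushSetup n, h.cur.ages.exti⟩

/-- `C13`'s exit: `lookup_type = 2` stored; K1 – K5 (older than `Am`) and the `multiplicands` block (younger) ⇒ `CodebookOK` over the
blocks allocated since the head of the iteration — `InC15.ok`. -/
example (i : Nat) (A2 A3 Ai Am : Arena) (mults j : Nat) (h : InC13 u₀ g i A2 A3 Ai Am A mults j v)
    (h6 : Codebook.K6 (Since Am A.1) v.mem (g.cb v.mem i)) : CodebookOK (Since Ai A.1) v.mem (g.cb v.mem i) := by
  have hk : K15 (Since Ai A.1) v.mem (g.cb v.mem i) := h.k.mono (fun _ hB => hB.mono h.extm')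
  refine hk.toOK ⟨h6.type_02, h6.prod_le, ?_, h6.null⟩
  intro ht
  obtain ⟨sz, hsz, hb⟩ := h6.mults ht
  exact ⟨sz, hsz, hb.older h.extm⟩

/-- `C15`'s exit: P4 released ⇒ `BodyC10 i`. -/
example (i : Nat) (A2 A3 Ai : Arena) (mults : Nat) (h : InC15 u₀ g i A2 A3 Ai A mults v) (fr : Frame u₀ g pc_C10 A v)
    (hno : A.1.temps = []) : BodyC10 u₀ g i A v := by
  obtain ⟨hsd, hages⟩ := h.cur.toSD4 hno h.ok
  exact ⟨fr, h.cur.hand, h.cur.slot_f, h.cur.slot_i, hsd, A2, A3, hages⟩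

/-- `C10`'s exit: `++i` ⇒ `BodyC2 (i + 1)`. -/
example (i : Nat) (h : BodyC10 u₀ g i A v) (fr : Frame u₀ g pc_C2 A v) (hi : v.mem.u32 (g.R + 0x30) = i + 1) :
    BodyC2 u₀ g (i + 1) A v :=
  ⟨fr, h.hand, h.slot_f, hi, h.sd, h.ages⟩

/-- `C16`'s exit: rbp reloaded ⇒ the hand-over `BodyF1` (`SD 5`, `Own 5`). -/
example (i : Nat) (h : BodyC16 u₀ g i A v) (fr : Frame u₀ g pc_F1 A v) (hr : v.reg .rbp = addr g.f) : BodyF1 u₀ g A v :=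
  { frame := fr
    rbp := hr
    sd := sd5_of_sd4 h.sd h.all
    hand := h.hand
    own := h.own.own5 h.all }

/-- Any error exit of the codebook part: SD.ERR from CUR(i), whatever temp blocks are outstanding. -/
example (i : Nat) (A2 A3 Ai : Arena) (h : Cur g i A2 A3 Ai A v) (fr : Frame u₀ g pc_ERR A v)
    (hax : (v.reg .rax).toNat % 2 ^ 32 = 0) : AtERR u₀ g v :=
  ⟨A, fr, h.hand, Or.inl ⟨hax, h.failed⟩⟩

/-! ### 2. Call sites -/

/-- The objects of the callers' frames and of `A.2` are objects inside the function too (its own frame in front). -/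
theorem sub_frames' (g : Ghost) (A : Arena × List Obj) (o : Obj) (h : o ∈ stackObjs g.frames ++ A.2) :
    o ∈ stackObjs g.frames' ++ A.2 := by
  unfold Ghost.frames'
  rw [stackObjs_cons]
  rcases List.mem_append.mp h with hs | ho
  · exact List.mem_append_left _ (List.mem_append_right _ hs)
  · exact List.mem_append_right _ ho

/-- **Every reader's memory-independent precondition** (S2's `ReaderEnv`) at any cut point: from `hand` and the `env.live` of the
point's invariant. With `Frame.shadow` (lowered to the callee's stack pointer), `Frame.offText` and `Bits` it is `ReaderPre`. -/
theorem readerEnv (hh : g.Hand A) (hl : BlkLive (g.Blk A) (g.Live A)) : ReaderEnv A.2 g.frames' (g.Blk A) g.len g.f :=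
  ⟨hl, hh.obj.mono (sub_frames' g A), fun hp => (hh.inp hp).mono (sub_frames' g A)⟩

/-- `ReaderPre` for a state `u` at a reader's entry whose shadow clause is known (`ShadowInv.lower` of `Frame.shadow` to
`u.rsp + 8`, through the push of the return address) — at `At4`, for `call start_page` / `start_packet` / `next_segment` /
`get8_packet`. -/
example (h : Body4 u₀ g A v) (u : State) (hsh : ShadowPre A.2 g.frames' u) (hrdi : u.reg .rdi = addr g.f)
    (hmem : Bits (g.Blk A) g.len u.mem g.f) (hf : g.f < 2 ^ 64) : ReaderPre A.2 g.frames' (g.Blk A) g.len u := by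
  have e : (u.reg .rdi).toNat = g.f := by
    rw [hrdi]
    exact toNat_addr g.f hf
  refine ⟨hsh, ?_, ?_⟩
  · rw [e]
    exact readerEnv h.hand h.sd.env.live
  · rw [e]
    exact hmem

/-- `start_page`'s extra precondition `next_seg ∈ {−1, 0}` at `At4` (and at `At2`: from H0). -/
example (h : Body4 u₀ g A v) : AtPageBoundary v.mem g.f := Or.inr h.next_seg

/-- **The allocators' precondition** (S1's `ArenaPre`) at a cut point with ArenaOK: OB1 bytewise from `env.live`, the arena above
the text from `hand`. Here at `At5` (`setup_malloc(f, len + 1)` for the vendor string). -/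
example (h : Body5 u₀ g A 6 v) (u : State) (hsh : ShadowPre A.2 g.frames' u) (hrdi : (u.reg .rdi).toNat = g.f)
    (harena : ArenaOK A.1 A.2 u.mem g.f) : ArenaPre A.1 A.2 g.frames' u := by
  refine ⟨hsh, ?_, ?_, h.hand.arenaText⟩
  · rw [hrdi]
    exact h.sd.env.live _ h.sd.bits.OB1
  · rw [hrdi]
    exact harena

/-- **compute_accelerated_huffman's precondition** (S3's `AccelPre`) at `AtC9`: K1 – K4 over the arena's block predicate (forget the
ages: `K3.mono`, `K4.mono`), the book inside the codebooks block. -/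
example (i : Nat) (A2 A3 Ai : Arena) (h : InC9 u₀ g i A2 A3 Ai A v) (u : State) (hsh : ShadowPre A.2 g.frames' u)
    (hmem : u.mem = v.mem) (hrdi : (u.reg .rdi).toNat = g.cb v.mem i) : AccelPre A.2 g.frames' A.1.Blk u := by
  have hlive : BlkLive A.1.Blk (Live (stackObjs g.frames' ++ A.2)) :=
    fun B hB => h.cur.sd.env.live B (up g A B hB)
  have hcb := h.cur.own.own.cb0 (by omega)
  have hne := h.cur.own.own.nonnull (by omega)
  have hok := hcb.ok hne
  refine ⟨hsh, hlive, ?_, ?_, ?_, ?_, ?_⟩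
  · rw [hrdi]
    exact ⟨_, hok.F2, hok.cb_in i h.cur.lt⟩
  · rw [hrdi, hmem]
    exact h.k1
  · rw [hrdi, hmem]
    exact h.k2
  · rw [hrdi, hmem]
    exact K3.mono h.k3 (fun _ hB => hB.1)
  · rw [hrdi, hmem]
    exact K4.mono h.k4 (fun _ hB => hB.1)

/-! ### 3. The payoff of the ages: a store into a table under construction -/

/-- Loop 3786 of `C4`, a dense book: the store `lengths[j] = …` keeps the record (the comment blocks, the codebooks block, every
finished book) and the struct `cb(i)` — the frame facts of the loop's invariant. -/
example (i : Nat) (A2 A3 Ai : Arena) (lengths j : Nat) (h : InC4 u₀ g i A2 A3 Ai A lengths j v)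
    (hs : Codebook.sparse v.mem (g.cb v.mem i) = 0) (hf : g.f + Off.sizeof.stb_vorbis ≤ 2 ^ 64) (x : Nat)
    (hj : j < (Codebook.entries v.mem (g.cb v.mem i)).toNat) :
    BookTrans A2 A3 Ai A.1 (v.mem.writeLE (addr (lengths + j)) 1 x) g.f i ∧
      (Codebook.block (g.cb v.mem i)).Kept v.mem (v.mem.writeLE (addr (lengths + j)) 1 x) := by
  have hb := h.place.dense_block hs
  have hin : (Block.mk lengths (Codebook.entries v.mem (g.cb v.mem i)).toNat).contains (lengths + j) 1 := by
    simp only [vblock]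
    omega
  exact ⟨h.cur.store_young hf hb x hin, h.cur.book_kept hb x hin⟩

/-- A field store into the struct `cb(i)` (here `c->lookup_type`, byte 25, in `C9`): the record is kept, and so is the `sorted_values`
block of book `i` (K4's sentinel, K4c) — it was allocated since the head of the iteration, the struct lies in an older block. -/
example (i : Nat) (A2 A3 Ai : Arena) (h : InC9 u₀ g i A2 A3 Ai A v) (hf : g.f + Off.sizeof.stb_vorbis ≤ 2 ^ 64) (x : Nat)
    (hse : 1 ≤ Codebook.sorted_entries v.mem (g.cb v.mem i)) :
    BookTrans A2 A3 Ai A.1 (v.mem.writeLE (addr (g.cb v.mem i + 25)) 1 x) g.f i ∧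
      (Codebook.svBlock v.mem (g.cb v.mem i)).Kept v.mem (v.mem.writeLE (addr (g.cb v.mem i + 25)) 1 x) := by
  have hin : (Codebook.block (g.cb v.mem i)).contains (g.cb v.mem i + 25) 1 := by
    simp only [vblock, voff]
    omega
  exact ⟨h.cur.store_book hf x hin, h.cur.young_kept (h.k4.sv hse) x hin⟩

end Vorbis.Spec.StartDecoder
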